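-- pv_equiv track=rewrite | github.com/Chang-Chia-Chi/Cousera-Standford-Algorithm-Specialization | Shortest Paths Revisited, NP-Complete Problems and What To Do About Them/week2/bitmasks.py | bitmasks
-- ===== SOURCE A (Python) =====
-- def bitmasks(n,m):
--     if m < n:
--         if m > 0:
--             for x in bitmasks(n-1,m-1):
--                 yield (1 << (n-1)) + x
--             for x in bitmasks(n-1,m):
--                 yield x
--         else:
--             yield 0
--     else:
--         yield (1 << n) - 1
-- ===== SOURCE B (Python) =====
-- def bitmasks(n, m):
--     # Iterative DFS with an explicit stack carrying the accumulated high bits,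
--     # yielding each mask directly instead of passing it up n generator levels.
--     stack = [(n, m, 0)]
--     while stack:
--         k, j, acc = stack.pop()
--         if j < k:
--             if j > 0:
--                 stack.append((k - 1, j, acc))
--                 stack.append((k - 1, j - 1, acc + (1 << (k - 1))))
--             else:
--                 yield acc
--         else:
--             yield acc + (1 << k) - 1
-- ===== Notes on version B (the rewrite author's own statement) =====
-- stated objective: alternative
-- what changed: Replaces A's nested recursive generators (each mask bubbles up through n generator levels) with an explicit-stack iterative DFS carrying an accumulator, yielding each mask directly in the same order.
import Mathlib
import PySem

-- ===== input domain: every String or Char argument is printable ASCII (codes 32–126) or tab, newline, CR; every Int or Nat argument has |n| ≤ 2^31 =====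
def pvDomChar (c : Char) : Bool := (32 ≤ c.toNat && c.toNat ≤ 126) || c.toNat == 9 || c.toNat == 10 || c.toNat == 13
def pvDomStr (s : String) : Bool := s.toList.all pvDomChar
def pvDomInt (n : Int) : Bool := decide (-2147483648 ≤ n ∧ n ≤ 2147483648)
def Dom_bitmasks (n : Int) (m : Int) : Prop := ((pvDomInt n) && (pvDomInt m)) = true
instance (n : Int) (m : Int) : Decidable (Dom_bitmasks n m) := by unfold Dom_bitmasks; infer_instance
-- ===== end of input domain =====

-- B replaces A's nested recursive generators by an explicit-stack iterative DFS that
-- carries an accumulator and yields each mask directly, in the same order as A.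

-- shared helper: Python's `1 << k` for k ≥ 0 (k < 0 raises in Python; excluded by Pre_)
def pvShl (k : Int) : Int := 2 ^ k.toNat

-- ===== PORT A =====
def bitmasks (n : Int) (m : Int) : List Int :=
  if m < n then
    if m > 0 then
      ((bitmasks (n - 1) (m - 1)).map (fun x => pvShl (n - 1) + x)) ++ bitmasks (n - 1) m
    else [0]
  else [pvShl n - 1]
termination_by n.toNat
decreasing_by all_goals omega

-- ===== PORT B =====
-- weight of the stack, used only as the termination measure of the loop
def pvW : List (Int × Int × Int) → Nat
  | [] => 0
  | (k, _, _) :: rest => 3 ^ k.toNat + pvW rest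

-- the `while stack:` loop of Source B; head of the list = top of the stack
def bitmasksRun (stack : List (Int × Int × Int)) : List Int :=
  match stack with
  | [] => []
  | (k, j, acc) :: rest =>
    if j < k then
      if j > 0 then
        bitmasksRun ((k - 1, j - 1, acc + pvShl (k - 1)) :: (k - 1, j, acc) :: rest)
      else acc :: bitmasksRun rest
    else (acc + pvShl k - 1) :: bitmasksRun rest
termination_by pvW stack
decreasing_by
  · simp only [pvW]
    have hk : k.toNat = (k - 1).toNat + 1 := by omega
    rw [hk, pow_succ]
    have h3 : 0 < 3 ^ (k - 1).toNat := Nat.pow_pos (by norm_num)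
    omega
  · simp only [pvW]
    have h3 : 0 < 3 ^ k.toNat := Nat.pow_pos (by norm_num)
    omega
  · simp only [pvW]
    have h3 : 0 < 3 ^ k.toNat := Nat.pow_pos (by norm_num)
    omega

def bitmasks_alt (n : Int) (m : Int) : List Int := bitmasksRun [(n, m, 0)]

-- ===== PRECONDITION & SPEC =====
-- Pre_ excludes exactly the inputs where Python A raises: n < 0 with m ≥ n makes `1 << n`
-- raise ValueError (both A and B raise there).
def Pre_bitmasks (n : Int) (m : Int) : Prop := m < n ∨ 0 ≤ n
instance (n : Int) (m : Int) : Decidable (Pre_bitmasks n m) := by unfold Pre_bitmasks; infer_instance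
def pvWitness_bitmasks : Int × Int := (5, 2)

def Spec_bitmasks (n : Int) (m : Int) (out : List Int) : Prop := out = bitmasks_alt n m
instance (n : Int) (m : Int) (out : List Int) : Decidable (Spec_bitmasks n m out) := by unfold Spec_bitmasks; infer_instance

-- ===== CLAIM (what is proved, stated in full; the proofs are below) =====
def Claim_equal_bitmasks : Prop := ∀ (n : Int) (m : Int), Dom_bitmasks n m → Pre_bitmasks n m → Spec_bitmasks n m (bitmasks n m)

-- ===== LEMMAS AND PROOFS =====

-- invariant: running the stack machine emits, for each stack frame (k, j, acc) in order,
-- the masks of A's recursion shifted by the accumulator.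
theorem bitmasksRun_eq (stack : List (Int × Int × Int)) :
    bitmasksRun stack = stack.flatMap (fun t => (bitmasks t.1 t.2.1).map (fun x => t.2.2 + x)) := by
  fun_induction bitmasksRun stack with
  | case1 => simp
  | case2 k j acc rest hlt hpos ih =>
    rw [ih]
    simp only [List.flatMap_cons]
    conv_rhs => rw [bitmasks.eq_def]
    rw [if_pos hlt, if_pos hpos]
    simp only [List.map_append, List.map_map, List.append_assoc]
    congr 1
    apply List.map_congr_left; intro x _; simp; ring
  | case3 k j acc rest hlt hpos ih =>
    rw [ih]
    simp only [List.flatMap_cons]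
    conv_rhs => rw [bitmasks.eq_def]
    rw [if_pos hlt, if_neg hpos]
    simp
  | case4 k j acc rest hlt ih =>
    rw [ih]
    simp only [List.flatMap_cons]
    conv_rhs => rw [bitmasks.eq_def]
    rw [if_neg hlt]
    simp [add_sub_assoc]

-- ===== VERDICT (by name: the statement is the Claim_ definition above) =====
theorem bitmasks_spec : Claim_equal_bitmasks := by
  intro n m _ _
  unfold Spec_bitmasks bitmasks_alt
  rw [bitmasksRun_eq]
  simp
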